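-- pv_equiv track=rewrite | github.com/jjoshua2/arc_agi | dupes/fcc82909_group-046/test_correct/1196.py | transform
-- ===== SOURCE A (Python) =====
-- def transform(grid_lst: list[list[int]]) -> list[list[int]]:
--     if not grid_lst:
--         return []
--     h = len(grid_lst)
--     if h == 0:
--         return []
--     w = len(grid_lst[0])
--     input_grid = grid_lst
--     output = [row[:] for row in input_grid]
--     visited = [[False for _ in range(w)] for _ in range(h)]
--     directions = [(-1, 0), (1, 0), (0, -1), (0, 1)]
--     for i in range(h):
--         for j in range(w):
--             if input_grid[i][j] > 0 and not visited[i][j]: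
--                 stack = [(i, j)]
--                 visited[i][j] = True
--                 colors_set = set()
--                 min_c = j
--                 max_c = j
--                 max_r = i
--                 stack.append((i, j))  # Ensure first is processed in loop
--                 while stack:
--                     x, y = stack.pop()
--                     colors_set.add(input_grid[x][y])
--                     min_c = min(min_c, y)
--                     max_c = max(max_c, y)
--                     max_r = max(max_r, x)
--                     for dx, dy in directions:
--                         nx = x + dx
--                         ny = y + dy
--                         if 0 <= nx < h and 0 <= ny < w and input_grid[nx][ny] > 0 and not visited[nx][ny]:
--                             visited[nx][ny] = True
--                             stack.append((nx, ny))
--                 N = len(colors_set)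
--                 for k in range(1, N + 1):
--                     nr = max_r + k
--                     if nr >= h:
--                         break
--                     for c in range(min_c, max_c + 1):
--                         if output[nr][c] == 0:
--                             output[nr][c] = 3
--     return output
-- ===== SOURCE B (Python) =====
-- def transform(grid_lst: list[list[int]]) -> list[list[int]]:
--     if not grid_lst:
--         return []
--     h = len(grid_lst)
--     w = len(grid_lst[0])
--     seen = set()
--     rects = []
--     for i in range(h):
--         for j in range(w):
--             if grid_lst[i][j] > 0 and (i, j) not in seen:
--                 q = [(i, j)]
--                 seen.add((i, j))
--                 k = 0
--                 while k < len(q):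
--                     x, y = q[k]
--                     k += 1
--                     for nx, ny in ((x - 1, y), (x + 1, y), (x, y - 1), (x, y + 1)):
--                         if 0 <= nx < h and 0 <= ny < w and grid_lst[nx][ny] > 0 and (nx, ny) not in seen:
--                             seen.add((nx, ny))
--                             q.append((nx, ny))
--                 cols = [c for _, c in q]
--                 n = len({grid_lst[x][y] for x, y in q})
--                 rects.append((min(cols), max(cols), max(r for r, _ in q), n))
--
--     def covered(r, c):
--         return any(mn <= c <= mx and mr < r <= mr + n for mn, mx, mr, n in rects)
--
--     return [[3 if v == 0 and covered(r, c) else v for c, v in enumerate(row)]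
--             for r, row in enumerate(grid_lst)]
-- ===== Notes on version B (the rewrite author's own statement) =====
-- stated objective: alternative
-- what changed: Replaces the interleaved stack-DFS with a boolean visited matrix and sequential in-place painting by a BFS worklist over a coordinate set that first collects every component's cells, aggregates each component to a (min col, max col, max row, distinct-color count) rectangle, and then rebuilds the whole output grid in one functional comprehension; the fill is order-independent so the result is identical.
import Mathlib
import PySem

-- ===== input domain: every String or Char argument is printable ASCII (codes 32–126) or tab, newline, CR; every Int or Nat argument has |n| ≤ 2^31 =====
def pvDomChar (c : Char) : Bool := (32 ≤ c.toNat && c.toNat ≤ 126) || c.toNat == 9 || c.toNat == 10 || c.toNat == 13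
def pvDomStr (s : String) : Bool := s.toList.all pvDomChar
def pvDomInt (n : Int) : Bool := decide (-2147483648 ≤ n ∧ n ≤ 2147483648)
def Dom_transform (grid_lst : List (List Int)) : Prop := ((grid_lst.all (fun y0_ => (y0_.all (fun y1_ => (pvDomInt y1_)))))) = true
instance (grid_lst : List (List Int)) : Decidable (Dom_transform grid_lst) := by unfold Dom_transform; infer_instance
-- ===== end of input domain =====

-- B replaces A's interleaved stack-DFS + in-place painting by a BFS worklist that collects
-- per-component rectangles and rebuilds the grid functionally (objective: alternative; same result).


-- ===== PORT A =====
-- grid[x][y] (every use in the Python is bounds-checked first, where this is exact)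
def pvGet2 (g : List (List Int)) (x y : Int) : Int :=
  (PySem.List.pyGet? ((PySem.List.pyGet? g x).getD []) y).getD 0

-- visited[x][y] lookup / visited[x][y] = True (Python indices here are always 0 ≤ _ < bound,
-- so .toNat is exact)
def pvVGet (v : List (List Bool)) (x y : Int) : Bool :=
  (v.getD x.toNat []).getD y.toNat false

def pvMark (v : List (List Bool)) (x y : Int) : List (List Bool) :=
  v.set x.toNat ((v.getD x.toNat []).set y.toNat true)

def pvDirs : List (Int × Int) := [(-1, 0), (1, 0), (0, -1), (0, 1)]

-- the 'for dx, dy in directions' body: mark-and-push each unvisited positive neighbour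
def pvExpandA (g : List (List Int)) (hh ww x y : Int)
    (a : List (List Bool) × List (Int × Int)) : List (List Bool) × List (Int × Int) :=
  pvDirs.foldl (fun a d =>
    let nx := x + d.1
    let ny := y + d.2
    if 0 ≤ nx ∧ nx < hh ∧ 0 ≤ ny ∧ ny < ww ∧ 0 < pvGet2 g nx ny ∧ pvVGet a.1 nx ny = false
    then (pvMark a.1 nx ny, a.2 ++ [(nx, ny)])
    else a) a

-- 'while stack:' — fuel only makes the recursion total; the call site passes enough
def pvLoopA (g : List (List Int)) (hh ww : Int) :
    Nat → List (List Bool) → List (Int × Int) → PySem.Set Int → Int → Int → Int →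
    List (List Bool) × PySem.Set Int × Int × Int × Int
  | 0, v, _, cs, mn, mx, mr => (v, cs, mn, mx, mr)
  | Nat.succ fuel, v, st, cs, mn, mx, mr =>
    match st.getLast? with
    | none => (v, cs, mn, mx, mr)
    | some (x, y) =>
      let st1 := st.dropLast
      let cs1 := PySem.Set.add cs (pvGet2 g x y)
      let mn1 := min mn y
      let mx1 := max mx y
      let mr1 := max mr x
      let p := pvExpandA g hh ww x y (v, st1)
      pvLoopA g hh ww fuel p.1 p.2 cs1 mn1 mx1 mr1

-- 'if output[nr][c] == 0: output[nr][c] = 3'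
def pvPaintCell (out : List (List Int)) (nr c : Int) : List (List Int) :=
  if (out.getD nr.toNat []).getD c.toNat 0 = 0
  then out.set nr.toNat ((out.getD nr.toNat []).set c.toNat 3)
  else out

-- 'for c in range(min_c, max_c + 1): …'
def pvPaintRowA (out : List (List Int)) (mn mx nr : Int) : List (List Int) :=
  (PySem.List.pyRange mn (mx + 1) 1).foldl (fun o c => pvPaintCell o nr c) out

-- 'for k in range(1, N + 1): nr = max_r + k; if nr >= h: break; …'
def pvPaintRowsA (hh mn mx : Int) : Nat → Int → List (List Int) → List (List Int)
  | 0, _, out => out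
  | Nat.succ n, nr, out =>
    if hh ≤ nr then out else pvPaintRowsA hh mn mx n (nr + 1) (pvPaintRowA out mn mx nr)

def transform (grid_lst : List (List Int)) : List (List Int) :=
  if grid_lst = [] then [] else
  let h := grid_lst.length
  let w := (grid_lst.headD []).length
  let res := (PySem.List.pyRange 0 (h : Int) 1).foldl (fun acc i =>
    (PySem.List.pyRange 0 (w : Int) 1).foldl (fun (acc : List (List Int) × List (List Bool)) j =>
      if 0 < pvGet2 grid_lst i j ∧ pvVGet acc.2 i j = false then
        let r := pvLoopA grid_lst h w (h * w + 2) (pvMark acc.2 i j) [(i, j), (i, j)] [] j j i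
        -- r = (visited, colors_set, min_c, max_c, max_r); N = len(colors_set)
        (pvPaintRowsA h r.2.2.1 r.2.2.2.1 r.2.1.length (r.2.2.2.2 + 1) acc.1, r.1)
      else acc) acc)
    (grid_lst, List.replicate h (List.replicate w false))
  res.1

-- ===== PORT B =====
-- the neighbour scan of Source B's BFS: enqueue + mark each unseen positive neighbour
def pvExpandB (g : List (List Int)) (hh ww x y : Int)
    (a : List (Int × Int) × PySem.Set (Int × Int)) : List (Int × Int) × PySem.Set (Int × Int) :=
  [(x - 1, y), (x + 1, y), (x, y - 1), (x, y + 1)].foldl (fun a p =>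
    if 0 ≤ p.1 ∧ p.1 < hh ∧ 0 ≤ p.2 ∧ p.2 < ww ∧ 0 < pvGet2 g p.1 p.2 ∧ p ∉ a.2
    then (a.1 ++ [p], PySem.Set.add a.2 p)
    else a) a

-- 'while k < len(q):' — fuel only makes the recursion total; the call site passes enough
def pvLoopB (g : List (List Int)) (hh ww : Int) :
    Nat → List (Int × Int) → Nat → PySem.Set (Int × Int) →
    List (Int × Int) × PySem.Set (Int × Int)
  | 0, q, _, seen => (q, seen)
  | Nat.succ fuel, q, k, seen =>
    match q[k]? with
    | none => (q, seen)
    | some (x, y) =>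
      let p := pvExpandB g hh ww x y (q, seen)
      pvLoopB g hh ww fuel p.1 (k + 1) p.2

-- min(xs) / max(xs) on a nonempty list of ints
def pvListMin : List Int → Int
  | [] => 0
  | a :: r => r.foldl min a

def pvListMax : List Int → Int
  | [] => 0
  | a :: r => r.foldl max a

-- 'any(mn <= c <= mx and mr < r <= mr + n for mn, mx, mr, n in rects)'
def pvCoveredB (rects : List (Int × Int × Int × Int)) (r c : Int) : Bool :=
  rects.any (fun t => decide (t.1 ≤ c ∧ c ≤ t.2.1 ∧ t.2.2.1 < r ∧ r ≤ t.2.2.1 + t.2.2.2))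

def transform_alt (grid_lst : List (List Int)) : List (List Int) :=
  if grid_lst = [] then [] else
  let h := grid_lst.length
  let w := (grid_lst.headD []).length
  let res := (PySem.List.pyRange 0 (h : Int) 1).foldl (fun acc i =>
    (PySem.List.pyRange 0 (w : Int) 1).foldl (fun (acc : PySem.Set (Int × Int) × List (Int × Int × Int × Int)) j =>
      if 0 < pvGet2 grid_lst i j ∧ (i, j) ∉ acc.1 then
        let p := pvLoopB grid_lst h w (h * w + 1) [(i, j)] 0
                   (PySem.Set.add acc.1 (i, j))
        let n := (PySem.Set.ofList (p.1.map (fun c => pvGet2 grid_lst c.1 c.2))).length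
        (p.2, acc.2 ++ [(pvListMin (p.1.map (·.2)), pvListMax (p.1.map (·.2)),
                         pvListMax (p.1.map (·.1)), (n : Int))])
      else acc) acc)
    ([], [])
  (PySem.List.enumerate grid_lst 0).map (fun rrow =>
    (PySem.List.enumerate rrow.2 0).map (fun cv =>
      if cv.2 = 0 ∧ pvCoveredB res.2 rrow.1 cv.1 = true then 3 else cv.2))

-- ===== PRECONDITION & SPEC =====
-- Pre_ excludes exactly the grids on which A raises IndexError: some row shorter than row 0
-- (A reads grid[i][j] for every j < len(grid[0])).
def Pre_transform (grid_lst : List (List Int)) : Prop :=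
  ∀ row ∈ grid_lst, (grid_lst.headD []).length ≤ row.length
instance (grid_lst : List (List Int)) : Decidable (Pre_transform grid_lst) := by
  unfold Pre_transform; infer_instance

def pvWitness_transform : List (List Int) := [[1, 0], [2, 0]]

def Spec_transform (grid_lst : List (List Int)) (out : List (List Int)) : Prop :=
  out = transform_alt grid_lst
instance (grid_lst : List (List Int)) (out : List (List Int)) : Decidable (Spec_transform grid_lst out) := by
  unfold Spec_transform; infer_instance

-- ===== CLAIM (what is proved, stated in full; the proofs are below) =====
def Claim_equal_transform : Prop :=
  ∀ (grid_lst : List (List Int)), Dom_transform grid_lst → Pre_transform grid_lst →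
    Spec_transform grid_lst (transform grid_lst)

-- ===== LEMMAS AND PROOFS =====

-- ============ abstract layer ============
def pvInB (g : List (List Int)) (p : Int × Int) : Prop :=
  0 ≤ p.1 ∧ p.1 < (g.length : Int) ∧ 0 ≤ p.2 ∧ p.2 < ((g.headD []).length : Int)

def pvPos (g : List (List Int)) (p : Int × Int) : Prop :=
  pvInB g p ∧ 0 < pvGet2 g p.1 p.2

def pvAdj (g : List (List Int)) (p q : Int × Int) : Prop :=
  pvPos g p ∧ pvPos g q ∧
    ((q.1 = p.1 - 1 ∧ q.2 = p.2) ∨ (q.1 = p.1 + 1 ∧ q.2 = p.2) ∨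
     (q.1 = p.1 ∧ q.2 = p.2 - 1) ∨ (q.1 = p.1 ∧ q.2 = p.2 + 1))

def pvReach (g : List (List Int)) (s t : Int × Int) : Prop :=
  Relation.ReflTransGen (pvAdj g) s t

lemma pvAdj_symm {g : List (List Int)} {p q : Int × Int} (h : pvAdj g p q) : pvAdj g q p := by
  obtain ⟨h1, h2, h3⟩ := h
  refine ⟨h2, h1, ?_⟩
  rcases h3 with ⟨a, b⟩ | ⟨a, b⟩ | ⟨a, b⟩ | ⟨a, b⟩
  · exact Or.inr (Or.inl ⟨by omega, by omega⟩)
  · exact Or.inl ⟨by omega, by omega⟩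
  · exact Or.inr (Or.inr (Or.inr ⟨by omega, by omega⟩))
  · exact Or.inr (Or.inr (Or.inl ⟨by omega, by omega⟩))

lemma pvPos_of_reach {g : List (List Int)} {s t : Int × Int} (hs : pvPos g s)
    (h : pvReach g s t) : pvPos g t := by
  induction h with
  | refl => exact hs
  | tail _ hadj _ => exact hadj.2.1

-- if V₀ is Adj-closed and contains some cell reachable from s, it contains s
lemma pvReach_escape {g : List (List Int)} {V₀ : Set (Int × Int)}
    (hcl : ∀ p ∈ V₀, ∀ q, pvAdj g p q → q ∈ V₀) {s t : Int × Int}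
    (h : pvReach g s t) (ht : t ∈ V₀) : s ∈ V₀ := by
  induction h with
  | refl => exact ht
  | tail _ hadj ih => exact ih (hcl _ ht _ (pvAdj_symm hadj))

-- ============ visited matrix ============
def pvWfV (g : List (List Int)) (v : List (List Bool)) : Prop :=
  v.length = g.length ∧ ∀ r ∈ v, r.length = (g.headD []).length

def pvVS (v : List (List Bool)) : Set (Int × Int) :=
  {p | 0 ≤ p.1 ∧ 0 ≤ p.2 ∧ pvVGet v p.1 p.2 = true}

def pvMu (v : List (List Bool)) : Nat := (v.map (fun r => r.count false)).sum

lemma pvVGet_eq {v : List (List Bool)} {a b : Nat} (ha : a < v.length)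
    (hb : b < v[a].length) : pvVGet v (a : Int) (b : Int) = v[a][b] := by
  simp [pvVGet, List.getD_eq_getElem?_getD, List.getElem?_eq_getElem ha,
    List.getElem?_eq_getElem hb]

lemma pvMark_eq {v : List (List Bool)} {x y : Int} (hx : x.toNat < v.length) :
    pvMark v x y = v.set x.toNat (v[x.toNat].set y.toNat true) := by
  simp [pvMark, List.getD_eq_getElem?_getD, List.getElem?_eq_getElem hx]

lemma pvMark_oob {v : List (List Bool)} {x y : Int} (hx : v.length ≤ x.toNat) :
    pvMark v x y = v := by
  simp [pvMark, List.set_eq_of_length_le hx]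

lemma pvWfV_mark {g : List (List Int)} {v : List (List Bool)} (hwf : pvWfV g v) (x y : Int) :
    pvWfV g (pvMark v x y) := by
  obtain ⟨h1, h2⟩ := hwf
  by_cases hx : x.toNat < v.length
  · rw [pvMark_eq hx]
    refine ⟨by simpa using h1, ?_⟩
    intro r hr
    rcases List.mem_or_eq_of_mem_set hr with h | h
    · exact h2 r h
    · subst h
      simpa using h2 _ (List.getElem_mem hx)
  · rw [pvMark_oob (by omega)]; exact ⟨h1, h2⟩

lemma pvVGet_mark_self {v : List (List Bool)} {x y : Int}
    (hx : x.toNat < v.length) (hy : y.toNat < v[x.toNat].length) :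
    pvVGet (pvMark v x y) x y = true := by
  rw [pvMark_eq hx]
  simp [pvVGet, List.getD_eq_getElem?_getD, List.getElem?_set_self hx,
    List.getElem?_set_self (by simpa using hy)]

lemma pvVGet_mark_other {v : List (List Bool)} {x y a b : Int}
    (hne : ¬ (a.toNat = x.toNat ∧ b.toNat = y.toNat)) :
    pvVGet (pvMark v x y) a b = pvVGet v a b := by
  by_cases hx : x.toNat < v.length
  · rw [pvMark_eq hx]
    by_cases hax : a.toNat = x.toNat
    · have hby : b.toNat ≠ y.toNat := fun h => hne ⟨hax, h⟩
      rw [pvVGet, pvVGet, hax]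
      simp [List.getD_eq_getElem?_getD, List.getElem?_set_self hx,
        List.getElem?_eq_getElem hx, List.getElem?_set_ne (Ne.symm hby)]
    · simp [pvVGet, List.getD_eq_getElem?_getD, List.getElem?_set_ne (Ne.symm hax)]
  · rw [pvMark_oob (by omega)]
lemma pvInB_mk {g : List (List Int)} {x y : Int} :
    pvInB g (x, y) ↔ 0 ≤ x ∧ x < (g.length : Int) ∧ 0 ≤ y ∧ y < ((g.headD []).length : Int) :=
  Iff.rfl

-- in-bounds row length under wf
lemma pvRow_len {g : List (List Int)} {v : List (List Bool)} (hwf : pvWfV g v)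
    {a : Nat} (ha : a < v.length) : v[a].length = (g.headD []).length :=
  hwf.2 _ (List.getElem_mem ha)

lemma pvVS_mark {g : List (List Int)} {v : List (List Bool)} (hwf : pvWfV g v)
    {x y : Int} (hb : pvInB g (x, y)) :
    pvVS (pvMark v x y) = pvVS v ∪ {(x, y)} := by
  rw [pvInB_mk] at hb
  obtain ⟨hx0, hx1, hy0, hy1⟩ := hb
  have hx : x.toNat < v.length := by rw [hwf.1]; omega
  have hy : y.toNat < v[x.toNat].length := by rw [pvRow_len hwf hx]; omega
  ext ⟨a, b⟩
  simp only [pvVS, Set.mem_union, Set.mem_setOf_eq, Set.mem_singleton_iff, Prod.mk.injEq]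
  constructor
  · rintro ⟨ha, hbb, hget⟩
    by_cases hne : a.toNat = x.toNat ∧ b.toNat = y.toNat
    · right; constructor <;> omega
    · left; exact ⟨ha, hbb, by rwa [pvVGet_mark_other hne] at hget⟩
  · rintro (⟨ha, hbb, hget⟩ | ⟨ha, hbb⟩)
    · refine ⟨ha, hbb, ?_⟩
      by_cases hne : a.toNat = x.toNat ∧ b.toNat = y.toNat
      · have : a = x ∧ b = y := by omega
        rw [this.1, this.2]; exact pvVGet_mark_self hx hy
      · rwa [pvVGet_mark_other hne]
    · subst ha; subst hbb
      exact ⟨by omega, by omega, pvVGet_mark_self hx hy⟩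

lemma pvGetD_oob {α : Type} (l : List α) (n : Nat) (d : α) (h : l.length ≤ n) :
    l.getD n d = d := by
  rw [List.getD_eq_getElem?_getD, List.getElem?_eq_none h]; rfl

-- count of a set to true decreases the false-count when the entry was false
lemma count_false_set (l : List Bool) (j : Nat) (h : j < l.length) (hf : l[j] = false) :
    (l.set j true).count false + 1 = l.count false := by
  rw [List.set_eq_take_append_cons_drop, if_pos h]
  conv_rhs => rw [← List.take_append_drop j l, List.drop_eq_getElem_cons h]
  simp only [List.count_append, List.count_cons, hf]
  simp; omega

lemma sum_set_nat (l : List Nat) (i : Nat) (h : i < l.length) (a : Nat) :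
    (l.set i a).sum + l[i] = l.sum + a := by
  have h1 : l.sum = (l.take i).sum + (l[i] + (l.drop (i + 1)).sum) := by
    conv_lhs => rw [← List.take_append_drop i l, List.drop_eq_getElem_cons h]
    rw [List.sum_append, List.sum_cons]
  have h2 : (l.set i a).sum = (l.take i).sum + (a + (l.drop (i + 1)).sum) := by
    rw [List.set_eq_take_append_cons_drop, if_pos h, List.sum_append, List.sum_cons]
  omega

lemma pvMu_mark {g : List (List Int)} {v : List (List Bool)} (hwf : pvWfV g v)
    {x y : Int} (hb : pvInB g (x, y)) (hget : pvVGet v x y = false) :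
    pvMu (pvMark v x y) + 1 = pvMu v := by
  rw [pvInB_mk] at hb
  obtain ⟨hx0, hx1, hy0, hy1⟩ := hb
  have hx : x.toNat < v.length := by rw [hwf.1]; omega
  have hy : y.toNat < v[x.toNat].length := by rw [pvRow_len hwf hx]; omega
  have hgf : v[x.toNat][y.toNat] = false := by
    have := pvVGet_eq hx hy
    rw [Int.toNat_of_nonneg hx0, Int.toNat_of_nonneg hy0] at this
    rw [← this]; exact hget
  rw [pvMark_eq hx]
  unfold pvMu
  rw [List.map_set]
  have hxm : x.toNat < (v.map (fun r => r.count false)).length := by simpa using hx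
  have := sum_set_nat (v.map (fun r => r.count false)) x.toNat hxm ((v[x.toNat].set y.toNat true).count false)
  simp only [List.getElem_map] at this
  have hc := count_false_set v[x.toNat] y.toNat hy hgf
  omega

lemma pvMu_le {g : List (List Int)} {v : List (List Bool)} (hwf : pvWfV g v) :
    pvMu v ≤ g.length * (g.headD []).length := by
  calc pvMu v ≤ (v.map (fun _ => (g.headD []).length)).sum := by
        apply List.sum_le_sum
        intro r hr
        calc r.count false ≤ r.length := List.count_le_length
          _ = (g.headD []).length := hwf.2 _ hr
    _ = g.length * (g.headD []).length := by
        rw [List.map_const', List.sum_replicate, hwf.1, smul_eq_mul]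
-- ============ neighbour folds ============
def pvStepA (g : List (List Int)) (a : List (List Bool) × List (Int × Int)) (p : Int × Int) :
    List (List Bool) × List (Int × Int) :=
  if 0 ≤ p.1 ∧ p.1 < ((g.length : Nat) : Int) ∧ 0 ≤ p.2 ∧ p.2 < (((g.headD []).length : Nat) : Int) ∧
      0 < pvGet2 g p.1 p.2 ∧ pvVGet a.1 p.1 p.2 = false
  then (pvMark a.1 p.1 p.2, a.2 ++ [p])
  else a

lemma pvExpandA_eq (g : List (List Int)) (x y : Int) (a : List (List Bool) × List (Int × Int)) :
    pvExpandA g ((g.length : Nat) : Int) (((g.headD []).length : Nat) : Int) x y a =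
      (pvDirs.map (fun d => (x + d.1, y + d.2))).foldl (pvStepA g) a := by
  rw [List.foldl_map]
  rfl

def pvStepB (g : List (List Int)) (a : List (Int × Int) × PySem.Set (Int × Int)) (p : Int × Int) :
    List (Int × Int) × PySem.Set (Int × Int) :=
  if 0 ≤ p.1 ∧ p.1 < ((g.length : Nat) : Int) ∧ 0 ≤ p.2 ∧ p.2 < (((g.headD []).length : Nat) : Int) ∧
      0 < pvGet2 g p.1 p.2 ∧ p ∉ a.2
  then (a.1 ++ [p], PySem.Set.add a.2 p)
  else a

lemma pvExpandB_eq (g : List (List Int)) (x y : Int) (a : List (Int × Int) × PySem.Set (Int × Int)) :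
    pvExpandB g ((g.length : Nat) : Int) (((g.headD []).length : Nat) : Int) x y a =
      [(x - 1, y), (x + 1, y), (x, y - 1), (x, y + 1)].foldl (pvStepB g) a := rfl

lemma pvNbrs_eq (x y : Int) :
    pvDirs.map (fun d => (x + d.1, y + d.2)) = [(x - 1, y), (x + 1, y), (x, y - 1), (x, y + 1)] := by
  simp [pvDirs]
  omega

lemma pvAdj_iff_mem {g : List (List Int)} {x y : Int} {q : Int × Int} (hxy : pvPos g (x, y)) :
    pvAdj g (x, y) q ↔ (q ∈ [(x - 1, y), (x + 1, y), (x, y - 1), (x, y + 1)] ∧ pvPos g q) := by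
  obtain ⟨qa, qb⟩ := q
  constructor
  · rintro ⟨-, hq, hcase⟩
    refine ⟨?_, hq⟩
    simp only [List.mem_cons, List.not_mem_nil, or_false, Prod.mk.injEq]
    rcases hcase with ⟨h1, h2⟩ | ⟨h1, h2⟩ | ⟨h1, h2⟩ | ⟨h1, h2⟩ <;> simp only at h1 h2 <;> omega
  · rintro ⟨hmem, hq⟩
    refine ⟨hxy, hq, ?_⟩
    simp only [List.mem_cons, List.not_mem_nil, or_false, Prod.mk.injEq] at hmem
    rcases hmem with ⟨h1, h2⟩ | ⟨h1, h2⟩ | ⟨h1, h2⟩ | ⟨h1, h2⟩ <;> simp only <;> omega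

lemma pvPos_notVS_iff {g : List (List Int)} {v : List (List Bool)} {p : Int × Int}
    (hp : pvPos g p) : p ∉ pvVS v ↔ pvVGet v p.1 p.2 = false := by
  obtain ⟨⟨h1, h2, h3, h4⟩, -⟩ := hp
  simp only [pvVS, Set.mem_setOf_eq, not_and]
  constructor
  · intro h
    cases hbe : pvVGet v p.1 p.2
    · rfl
    · exact absurd hbe (h h1 h3)
  · intro h _ _
    simp [h]

lemma pvFoldA_spec (g : List (List Int)) :
    ∀ (ns : List (Int × Int)) (v : List (List Bool)) (st : List (Int × Int)), pvWfV g v →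
    ∃ (v' : List (List Bool)) (new : List (Int × Int)),
      ns.foldl (pvStepA g) (v, st) = (v', st ++ new) ∧
      pvWfV g v' ∧ pvVS v' = pvVS v ∪ {p | p ∈ new} ∧ new.Nodup ∧
      (∀ p ∈ new, p ∈ ns ∧ pvPos g p ∧ p ∉ pvVS v) ∧
      pvMu v' + new.length = pvMu v ∧
      (∀ p ∈ ns, pvPos g p → p ∈ pvVS v') := by
  intro ns
  induction ns with
  | nil =>
    intro v st hwf
    exact ⟨v, [], by simp, hwf, by simp, by simp, by simp, by simp, by simp⟩
  | cons p ns ih =>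
    intro v st hwf
    by_cases hc : 0 ≤ p.1 ∧ p.1 < ((g.length : Nat) : Int) ∧ 0 ≤ p.2 ∧
        p.2 < (((g.headD []).length : Nat) : Int) ∧ 0 < pvGet2 g p.1 p.2 ∧
        pvVGet v p.1 p.2 = false
    · obtain ⟨h1, h2, h3, h4, h5, h6⟩ := hc
      have hpos : pvPos g p := ⟨⟨h1, by exact_mod_cast h2, h3, by exact_mod_cast h4⟩, h5⟩
      have hpin : pvInB g (p.1, p.2) := hpos.1
      have hnotvs : p ∉ pvVS v := (pvPos_notVS_iff hpos).mpr h6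
      have hstep : pvStepA g (v, st) p = (pvMark v p.1 p.2, st ++ [p]) := by
        rw [pvStepA, if_pos ⟨h1, h2, h3, h4, h5, h6⟩]
      have hwf1 : pvWfV g (pvMark v p.1 p.2) := pvWfV_mark hwf _ _
      obtain ⟨v', new', heq, hwf', hvs', hnd', hmem', hmu', hlast'⟩ :=
        ih (pvMark v p.1 p.2) (st ++ [p]) hwf1
      have hvs1 : pvVS (pvMark v p.1 p.2) = pvVS v ∪ {p} := by
        have := pvVS_mark hwf hpin
        simpa using this
      refine ⟨v', p :: new', ?_, hwf', ?_, ?_, ?_, ?_, ?_⟩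
      · rw [List.foldl_cons, hstep, heq]
        simp
      · rw [hvs', hvs1]
        ext z
        simp only [Set.mem_union, Set.mem_setOf_eq, List.mem_cons, Set.mem_singleton_iff]
        tauto
      · refine List.nodup_cons.mpr ⟨?_, hnd'⟩
        intro hmem
        have := (hmem' p hmem).2.2
        rw [hvs1] at this
        exact this (Or.inr rfl)
      · intro q hq
        rcases List.mem_cons.mp hq with rfl | hq'
        · exact ⟨List.mem_cons_self, hpos, hnotvs⟩
        · obtain ⟨hm, hp2, hp3⟩ := hmem' q hq'
          refine ⟨List.mem_cons_of_mem _ hm, hp2, ?_⟩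
          rw [hvs1] at hp3
          exact fun h => hp3 (Or.inl h)
      · have := pvMu_mark hwf hpin h6
        simp only [List.length_cons]
        omega
      · intro q hq hqpos
        rcases List.mem_cons.mp hq with rfl | hq'
        · rw [hvs']
          left
          rw [hvs1]
          exact Or.inr rfl
        · exact hlast' q hq' hqpos
    · have hstep : pvStepA g (v, st) p = (v, st) := by rw [pvStepA, if_neg hc]
      obtain ⟨v', new', heq, hwf', hvs', hnd', hmem', hmu', hlast'⟩ := ih v st hwf
      refine ⟨v', new', by rw [List.foldl_cons, hstep]; exact heq, hwf', hvs', hnd', ?_, hmu', ?_⟩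
      · intro q hq
        obtain ⟨hm, hp2, hp3⟩ := hmem' q hq
        exact ⟨List.mem_cons_of_mem _ hm, hp2, hp3⟩
      · intro q hq hqpos
        rcases List.mem_cons.mp hq with rfl | hq'
        · -- condition failed but q is pos: hence it was already visited
          have hvt : pvVGet v q.1 q.2 = true := by
            obtain ⟨⟨b1, b2, b3, b4⟩, b5⟩ := hqpos
            by_contra hbf
            exact hc ⟨b1, by exact_mod_cast b2, b3, by exact_mod_cast b4, b5, by
              cases h : pvVGet v q.1 q.2
              · rfl
              · exact absurd h hbf⟩
          have : q ∈ pvVS v := ⟨hqpos.1.1, hqpos.1.2.2.1, hvt⟩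
          rw [hvs']
          exact Or.inl this
        · exact hlast' q hq' hqpos
lemma pvFoldB_spec (g : List (List Int)) :
    ∀ (ns : List (Int × Int)) (q : List (Int × Int)) (seen : PySem.Set (Int × Int)),
    ∃ (new : List (Int × Int)),
      ns.foldl (pvStepB g) (q, seen) = (q ++ new, seen ++ new) ∧
      new.Nodup ∧
      (∀ p ∈ new, p ∈ ns ∧ pvPos g p ∧ p ∉ seen) ∧
      (∀ p ∈ ns, pvPos g p → p ∈ seen ++ new) := by
  intro ns
  induction ns with
  | nil => intro q seen; exact ⟨[], by simp, by simp, by simp, by simp⟩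
  | cons p ns ih =>
    intro q seen
    by_cases hc : 0 ≤ p.1 ∧ p.1 < ((g.length : Nat) : Int) ∧ 0 ≤ p.2 ∧
        p.2 < (((g.headD []).length : Nat) : Int) ∧ 0 < pvGet2 g p.1 p.2 ∧ p ∉ seen
    · obtain ⟨h1, h2, h3, h4, h5, h6⟩ := hc
      have hpos : pvPos g p := ⟨⟨h1, by exact_mod_cast h2, h3, by exact_mod_cast h4⟩, h5⟩
      have hstep : pvStepB g (q, seen) p = (q ++ [p], seen ++ [p]) := by
        rw [pvStepB, if_pos ⟨h1, h2, h3, h4, h5, h6⟩, PySem.Set.add_of_not_mem h6]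
      obtain ⟨new', heq, hnd', hmem', hlast'⟩ := ih (q ++ [p]) (seen ++ [p])
      refine ⟨p :: new', ?_, ?_, ?_, ?_⟩
      · rw [List.foldl_cons, hstep, heq]; simp
      · refine List.nodup_cons.mpr ⟨fun hmem => ?_, hnd'⟩
        exact (hmem' p hmem).2.2 (by simp)
      · intro z hz
        rcases List.mem_cons.mp hz with rfl | hz'
        · exact ⟨List.mem_cons_self, hpos, h6⟩
        · obtain ⟨hm, hp2, hp3⟩ := hmem' z hz'
          exact ⟨List.mem_cons_of_mem _ hm, hp2, fun h => hp3 (by simp [h])⟩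
      · intro z hz hzpos
        rcases List.mem_cons.mp hz with rfl | hz'
        · simp
        · have := hlast' z hz' hzpos
          simp only [List.mem_append, List.mem_cons] at this ⊢
          tauto
    · have hstep : pvStepB g (q, seen) p = (q, seen) := by rw [pvStepB, if_neg hc]
      obtain ⟨new', heq, hnd', hmem', hlast'⟩ := ih q seen
      refine ⟨new', by rw [List.foldl_cons, hstep]; exact heq, hnd', ?_, ?_⟩
      · intro z hz
        obtain ⟨hm, hp2, hp3⟩ := hmem' z hz
        exact ⟨List.mem_cons_of_mem _ hm, hp2, hp3⟩
      · intro z hz hzpos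
        rcases List.mem_cons.mp hz with rfl | hz'
        · have hmemseen : z ∈ seen := by
            obtain ⟨⟨b1, b2, b3, b4⟩, b5⟩ := hzpos
            by_contra hns
            exact hc ⟨b1, by exact_mod_cast b2, b3, by exact_mod_cast b4, b5, hns⟩
          exact List.mem_append_left _ hmemseen
        · exact hlast' z hz' hzpos
-- ============ invariant bundles and the component characterisation ============
lemma pvM_eq_reach {g : List (List Int)} {s : Int × Int} {V₀ M : Set (Int × Int)}
    (hcl : ∀ p ∈ V₀, ∀ q, pvAdj g p q → q ∈ V₀) (hsV : s ∉ V₀)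
    (hM : ∀ p ∈ M, pvReach g s p) (hsM : s ∈ M)
    (hexp : ∀ p ∈ M, ∀ q, pvAdj g p q → q ∈ V₀ ∪ M) :
    ∀ t, pvReach g s t ↔ t ∈ M := by
  intro t
  constructor
  · intro h
    induction h with
    | refl => exact hsM
    | @tail p q hr hadj ih =>
      rcases hexp p ih q hadj with hq | hq
      · exact absurd (pvReach_escape hcl (Relation.ReflTransGen.tail hr hadj) hq) hsV
      · exact hq
  · exact hM t

-- stats invariants: running extremum over processed set P (seeded with s's coordinate)
def pvInvMin (c0 : Int) (f : Int × Int → Int) (P : Set (Int × Int)) (m : Int) : Prop :=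
  (m = c0 ∨ ∃ p ∈ P, f p = m) ∧ m ≤ c0 ∧ ∀ p ∈ P, m ≤ f p

def pvInvMax (c0 : Int) (f : Int × Int → Int) (P : Set (Int × Int)) (m : Int) : Prop :=
  (m = c0 ∨ ∃ p ∈ P, f p = m) ∧ c0 ≤ m ∧ ∀ p ∈ P, f p ≤ m

-- final characterisations of the four aggregates over the component R = reach(s)
def pvIsMin (g : List (List Int)) (s : Int × Int) (f : Int × Int → Int) (m : Int) : Prop :=
  (∃ p, pvReach g s p ∧ f p = m) ∧ ∀ p, pvReach g s p → m ≤ f p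

def pvIsMax (g : List (List Int)) (s : Int × Int) (f : Int × Int → Int) (m : Int) : Prop :=
  (∃ p, pvReach g s p ∧ f p = m) ∧ ∀ p, pvReach g s p → f p ≤ m

lemma pvIsMin_unique {g : List (List Int)} {s : Int × Int} {f : Int × Int → Int} {m m' : Int}
    (h : pvIsMin g s f m) (h' : pvIsMin g s f m') : m = m' := by
  obtain ⟨⟨p, hp, hpm⟩, hlb⟩ := h
  obtain ⟨⟨p', hp', hpm'⟩, hlb'⟩ := h'
  have := hlb p' hp'
  have := hlb' p hp
  omega

lemma pvIsMax_unique {g : List (List Int)} {s : Int × Int} {f : Int × Int → Int} {m m' : Int}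
    (h : pvIsMax g s f m) (h' : pvIsMax g s f m') : m = m' := by
  obtain ⟨⟨p, hp, hpm⟩, hub⟩ := h
  obtain ⟨⟨p', hp', hpm'⟩, hub'⟩ := h'
  have := hub p' hp'
  have := hub' p hp
  omega

lemma pvInvMin_end {g : List (List Int)} {s : Int × Int} {f : Int × Int → Int}
    {P : Set (Int × Int)} {m : Int} (hinv : pvInvMin (f s) f P m)
    (hP : ∀ p, p ∈ P ↔ pvReach g s p) : pvIsMin g s f m := by
  obtain ⟨hw, hle, hlb⟩ := hinv
  constructor
  · rcases hw with h | ⟨p, hp, hfp⟩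
    · exact ⟨s, Relation.ReflTransGen.refl, h.symm⟩
    · exact ⟨p, (hP p).mp hp, hfp⟩
  · intro p hp
    rcases (hP p).mpr hp with h
    exact hlb p h

lemma pvInvMax_end {g : List (List Int)} {s : Int × Int} {f : Int × Int → Int}
    {P : Set (Int × Int)} {m : Int} (hinv : pvInvMax (f s) f P m)
    (hP : ∀ p, p ∈ P ↔ pvReach g s p) : pvIsMax g s f m := by
  obtain ⟨hw, hle, hub⟩ := hinv
  constructor
  · rcases hw with h | ⟨p, hp, hfp⟩
    · exact ⟨s, Relation.ReflTransGen.refl, h.symm⟩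
    · exact ⟨p, (hP p).mp hp, hfp⟩
  · intro p hp
    exact hub p ((hP p).mpr hp)

-- the colour multiset invariant
def pvInvCols (g : List (List Int)) (P : Set (Int × Int)) (cs : PySem.Set Int) : Prop :=
  cs.Nodup ∧ ∀ z, z ∈ cs ↔ ∃ p ∈ P, pvGet2 g p.1 p.2 = z

-- what the A-loop establishes
def pvPostA (g : List (List Int)) (s : Int × Int) (V₀ : Set (Int × Int))
    (r : List (List Bool) × PySem.Set Int × Int × Int × Int) : Prop :=
  pvWfV g r.1 ∧ pvVS r.1 = V₀ ∪ {t | pvReach g s t} ∧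
  r.2.1.Nodup ∧ (∀ z, z ∈ r.2.1 ↔ ∃ p, pvReach g s p ∧ pvGet2 g p.1 p.2 = z) ∧
  pvIsMin g s (·.2) r.2.2.1 ∧ pvIsMax g s (·.2) r.2.2.2.1 ∧ pvIsMax g s (·.1) r.2.2.2.2
-- the A-loop invariant bundle
def pvInvA (g : List (List Int)) (s : Int × Int) (V₀ M P : Set (Int × Int))
    (v : List (List Bool)) (st : List (Int × Int)) (cs : PySem.Set Int) (mn mx mr : Int) : Prop :=
  pvWfV g v ∧ pvVS v = V₀ ∪ M ∧ (∀ p ∈ M, pvReach g s p) ∧ s ∈ M ∧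
  (∀ p ∈ st, p ∈ M) ∧ (∀ p ∈ M, p ∈ st ∨ p ∈ P) ∧
  (∀ p ∈ P, ∀ q, pvAdj g p q → q ∈ pvVS v) ∧ (∀ p ∈ P, p ∈ M) ∧
  pvInvCols g P cs ∧ pvInvMin s.2 (·.2) P mn ∧ pvInvMax s.2 (·.2) P mx ∧ pvInvMax s.1 (·.1) P mr

lemma pvPostA_of_done {g : List (List Int)} {s : Int × Int} {V₀ M P : Set (Int × Int)}
    {v : List (List Bool)} {cs : PySem.Set Int} {mn mx mr : Int}
    (hcl : ∀ p ∈ V₀, ∀ q, pvAdj g p q → q ∈ V₀) (hsV : s ∉ V₀)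
    (hinv : pvInvA g s V₀ M P v [] cs mn mx mr) : pvPostA g s V₀ (v, cs, mn, mx, mr) := by
  obtain ⟨hwf, hvs, hM, hsM, hst, hcov, hexp, hPM, hcols, hmn, hmx, hmr⟩ := hinv
  have hMP : ∀ p ∈ M, p ∈ P := fun p hp => (hcov p hp).resolve_left (by simp)
  have hMreach := pvM_eq_reach hcl hsV hM hsM
    (fun p hp q hq => by rw [← hvs]; exact hexp p (hMP p hp) q hq)
  have hPiff : ∀ p, p ∈ P ↔ pvReach g s p := by
    intro p
    exact ⟨fun h => hM p (hPM p h), fun h => hMP p ((hMreach p).mp h)⟩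
  refine ⟨hwf, ?_, hcols.1, ?_, ?_, ?_, ?_⟩
  · rw [hvs]
    congr 1
    ext t
    simp only [Set.mem_setOf_eq]
    exact (hMreach t).symm
  · intro z
    rw [hcols.2 z]
    constructor
    · rintro ⟨p, hp, hz⟩; exact ⟨p, (hPiff p).mp hp, hz⟩
    · rintro ⟨p, hp, hz⟩; exact ⟨p, (hPiff p).mpr hp, hz⟩
  · exact pvInvMin_end hmn hPiff
  · exact pvInvMax_end hmx hPiff
  · exact pvInvMax_end hmr hPiff

lemma pvLoopA_spec (g : List (List Int)) (s : Int × Int) (V₀ : Set (Int × Int))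
    (hcl : ∀ p ∈ V₀, ∀ q, pvAdj g p q → q ∈ V₀) (hsV : s ∉ V₀) (hs : pvPos g s) :
    ∀ (fuel : Nat) (v : List (List Bool)) (st : List (Int × Int)) (cs : PySem.Set Int)
      (mn mx mr : Int) (M P : Set (Int × Int)),
      pvInvA g s V₀ M P v st cs mn mx mr →
      pvMu v + st.length ≤ fuel →
      pvPostA g s V₀
        (pvLoopA g ((g.length : Nat) : Int) (((g.headD []).length : Nat) : Int)
          fuel v st cs mn mx mr) := by
  intro fuel
  induction fuel with
  | zero =>
    intro v st cs mn mx mr M P hinv hfuel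
    have hst : st = [] := by
      have := List.length_eq_zero_iff.mp (by omega : st.length = 0)
      exact this
    subst hst
    exact pvPostA_of_done hcl hsV hinv
  | succ fuel ih =>
    intro v st cs mn mx mr M P hinv hfuel
    cases hlast : st.getLast? with
    | none =>
      have hst : st = [] := by simpa using hlast
      subst hst
      simp only [pvLoopA, List.getLast?_nil]
      exact pvPostA_of_done hcl hsV hinv
    | some l =>
      obtain ⟨x, y⟩ := l
      obtain ⟨st0, rfl⟩ := List.getLast?_eq_some_iff.mp hlast
      obtain ⟨hwf, hvs, hM, hsM, hst, hcov, hexp, hPM, hcols, hmn, hmx, hmr⟩ := hinv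
      have hxyM : (x, y) ∈ M := hst _ (by simp)
      have hxyR : pvReach g s (x, y) := hM _ hxyM
      have hxyP : pvPos g (x, y) := pvPos_of_reach hs hxyR
      -- one step of the loop
      simp only [pvLoopA, hlast]
      rw [List.dropLast_concat, pvExpandA_eq, pvNbrs_eq]
      obtain ⟨v1, new, heq, hwf1, hvs1, hnd1, hmem1, hmu1, hlast1⟩ :=
        pvFoldA_spec g [(x - 1, y), (x + 1, y), (x, y - 1), (x, y + 1)] v st0 hwf
      rw [heq]
      -- new invariant data
      refine ih v1 (st0 ++ new) _ _ _ _ (M ∪ {p | p ∈ new}) (P ∪ {(x, y)})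
        ⟨hwf1, ?_, ?_, Or.inl hsM, ?_, ?_, ?_, ?_, ?_, ?_, ?_, ?_⟩ ?_
      · -- pvVS v1 = V₀ ∪ (M ∪ new)
        rw [hvs1, hvs, Set.union_assoc]
      · -- all of M ∪ new reachable
        rintro p (hp | hp)
        · exact hM p hp
        · have hadj : pvAdj g (x, y) p :=
            (pvAdj_iff_mem hxyP).mpr ⟨(hmem1 p hp).1, (hmem1 p hp).2.1⟩
          exact Relation.ReflTransGen.tail hxyR hadj
      · -- worklist ⊆ M'
        intro p hp
        rcases List.mem_append.mp hp with hp' | hp'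
        · exact Or.inl (hst _ (List.mem_append_left _ hp'))
        · exact Or.inr hp'
      · -- covering: every element of M' is pending or processed
        rintro p (hp | hp)
        · rcases hcov p hp with hp' | hp'
          · rcases List.mem_append.mp hp' with h | h
            · exact Or.inl (List.mem_append_left _ h)
            · exact Or.inr (Or.inr (by simpa using h))
          · exact Or.inr (Or.inl hp')
        · exact Or.inl (List.mem_append_right _ hp)
      · -- processed cells are fully expanded
        rintro p (hp | hp) q hq
        · rw [hvs1]
          exact Or.inl (hexp p hp q hq)
        · have hpxy : p = (x, y) := hp
          subst hpxy
          have := (pvAdj_iff_mem hxyP).mp hq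
          exact hlast1 q this.1 this.2
      · -- processed ⊆ M'
        rintro p (hp | hp)
        · exact Or.inl (hPM p hp)
        · exact Or.inl (hp ▸ hxyM)
      · -- colours
        refine ⟨PySem.Set.nodup_add _ _ hcols.1, ?_⟩
        intro z
        rw [PySem.Set.mem_add, hcols.2 z]
        constructor
        · rintro (⟨p, hp, hz⟩ | rfl)
          · exact ⟨p, Or.inl hp, hz⟩
          · exact ⟨(x, y), Or.inr rfl, rfl⟩
        · rintro ⟨p, hp | hp, hz⟩
          · exact Or.inl ⟨p, hp, hz⟩
          · exact Or.inr (by rw [← hz, hp])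
      · -- min invariant
        obtain ⟨hw, hle, hlb⟩ := hmn
        refine ⟨?_, le_trans (min_le_left _ _) hle, ?_⟩
        · rcases le_total mn y with h | h
          · rw [min_eq_left h]
            rcases hw with h' | ⟨p, hp, hfp⟩
            · exact Or.inl h'
            · exact Or.inr ⟨p, Or.inl hp, hfp⟩
          · rw [min_eq_right h]
            exact Or.inr ⟨(x, y), Or.inr rfl, rfl⟩
        · rintro p (hp | hp)
          · exact le_trans (min_le_left _ _) (hlb p hp)
          · rw [hp]
            exact min_le_right _ _
      · -- max-column invariant
        obtain ⟨hw, hle, hub⟩ := hmx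
        refine ⟨?_, le_trans hle (le_max_left _ _), ?_⟩
        · rcases le_total y mx with h | h
          · rw [max_eq_left h]
            rcases hw with h' | ⟨p, hp, hfp⟩
            · exact Or.inl h'
            · exact Or.inr ⟨p, Or.inl hp, hfp⟩
          · rw [max_eq_right h]
            exact Or.inr ⟨(x, y), Or.inr rfl, rfl⟩
        · rintro p (hp | hp)
          · exact le_trans (hub p hp) (le_max_left _ _)
          · rw [hp]
            exact le_max_right _ _
      · -- max-row invariant
        obtain ⟨hw, hle, hub⟩ := hmr
        refine ⟨?_, le_trans hle (le_max_left _ _), ?_⟩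
        · rcases le_total x mr with h | h
          · rw [max_eq_left h]
            rcases hw with h' | ⟨p, hp, hfp⟩
            · exact Or.inl h'
            · exact Or.inr ⟨p, Or.inl hp, hfp⟩
          · rw [max_eq_right h]
            exact Or.inr ⟨(x, y), Or.inr rfl, rfl⟩
        · rintro p (hp | hp)
          · exact le_trans (hub p hp) (le_max_left _ _)
          · rw [hp]
            exact le_max_right _ _
      · -- fuel accounting
        simp only [List.length_append, List.length_cons, List.length_nil] at hfuel ⊢
        omega
-- ============ the B loop ============
def pvCellF (g : List (List Int)) : Finset (Int × Int) :=
  ((Finset.range g.length) ×ˢ (Finset.range (g.headD []).length)).image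
    (fun n => ((n.1 : Int), (n.2 : Int)))

lemma mem_pvCellF {g : List (List Int)} {p : Int × Int} : p ∈ pvCellF g ↔ pvInB g p := by
  simp only [pvCellF, Finset.mem_image, Finset.mem_product, Finset.mem_range, pvInB]
  constructor
  · rintro ⟨⟨a, b⟩, ⟨ha, hb⟩, rfl⟩
    refine ⟨by simp, by simpa using ha, by simp, by simpa using hb⟩
  · rintro ⟨h1, h2, h3, h4⟩
    refine ⟨(p.1.toNat, p.2.toNat), ⟨by omega, by omega⟩, ?_⟩
    have e1 : ((p.1.toNat : Int), (p.2.toNat : Int)) = (p.1, p.2) := by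
      rw [Int.toNat_of_nonneg h1, Int.toNat_of_nonneg h3]
    simpa using e1

lemma card_pvCellF (g : List (List Int)) :
    (pvCellF g).card = g.length * (g.headD []).length := by
  rw [pvCellF, Finset.card_image_of_injective _ ?_, Finset.card_product,
    Finset.card_range, Finset.card_range]
  rintro ⟨a, b⟩ ⟨c, d⟩ h
  simp only [Prod.mk.injEq] at h ⊢
  omega

lemma pvSeen_le {g : List (List Int)} {seen : List (Int × Int)} (hnd : seen.Nodup)
    (hb : ∀ p ∈ seen, pvInB g p) : seen.length ≤ g.length * (g.headD []).length := by
  calc seen.length = seen.toFinset.card := (List.toFinset_card_of_nodup hnd).symm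
    _ ≤ (pvCellF g).card :=
        Finset.card_le_card (fun p hp => mem_pvCellF.mpr (hb p (List.mem_toFinset.mp hp)))
    _ = _ := card_pvCellF g

def pvPostB (g : List (List Int)) (s : Int × Int) (V₀ : Set (Int × Int))
    (r : List (Int × Int) × PySem.Set (Int × Int)) : Prop :=
  r.1.Nodup ∧ (∀ p, p ∈ r.1 ↔ pvReach g s p) ∧
  r.2.Nodup ∧ (∀ p, p ∈ r.2 ↔ (p ∈ V₀ ∨ pvReach g s p)) ∧ (∀ p ∈ r.2, pvInB g p)

def pvInvB (g : List (List Int)) (s : Int × Int) (V₀ : Set (Int × Int))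
    (q : List (Int × Int)) (k : Nat) (seen : PySem.Set (Int × Int)) : Prop :=
  q.Nodup ∧ (∀ p ∈ q, pvReach g s p) ∧ s ∈ q ∧
  seen.Nodup ∧ (∀ p, p ∈ seen ↔ (p ∈ V₀ ∨ p ∈ q)) ∧ (∀ p ∈ seen, pvInB g p) ∧
  (∀ p ∈ q.take k, ∀ t, pvAdj g p t → t ∈ seen)

lemma pvPostB_of_done {g : List (List Int)} {s : Int × Int} {V₀ : Set (Int × Int)}
    {q : List (Int × Int)} {k : Nat} {seen : PySem.Set (Int × Int)}
    (hcl : ∀ p ∈ V₀, ∀ q, pvAdj g p q → q ∈ V₀) (hsV : s ∉ V₀)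
    (hinv : pvInvB g s V₀ q k seen) (hk : q.length ≤ k) : pvPostB g s V₀ (q, seen) := by
  obtain ⟨hnd, hR, hsq, hsnd, hsiff, hsb, hexp⟩ := hinv
  have htake : q.take k = q := List.take_of_length_le hk
  rw [htake] at hexp
  have hMreach := pvM_eq_reach (M := {p | p ∈ q}) hcl hsV hR hsq
    (fun p hp t ht => by
      rcases (hsiff t).mp (hexp p hp t ht) with h | h
      · exact Or.inl h
      · exact Or.inr h)
  refine ⟨hnd, fun p => ⟨fun h => hR p h, fun h => (hMreach p).mp h⟩, hsnd, ?_, hsb⟩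
  intro p
  rw [hsiff p]
  constructor
  · rintro (h | h)
    · exact Or.inl h
    · exact Or.inr ((hMreach p).mpr h)
  · rintro (h | h)
    · exact Or.inl h
    · exact Or.inr ((hMreach p).mp h)

lemma pvLoopB_spec (g : List (List Int)) (s : Int × Int) (V₀ : Set (Int × Int))
    (hcl : ∀ p ∈ V₀, ∀ q, pvAdj g p q → q ∈ V₀) (hsV : s ∉ V₀) (hs : pvPos g s) :
    ∀ (fuel : Nat) (q : List (Int × Int)) (k : Nat) (seen : PySem.Set (Int × Int)),
      pvInvB g s V₀ q k seen →
      (g.length * (g.headD []).length - seen.length) + (q.length - k) ≤ fuel →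
      pvPostB g s V₀
        (pvLoopB g ((g.length : Nat) : Int) (((g.headD []).length : Nat) : Int) fuel q k seen) := by
  intro fuel
  induction fuel with
  | zero =>
    intro q k seen hinv hfuel
    exact pvPostB_of_done hcl hsV hinv (by omega)
  | succ fuel ih =>
    intro q k seen hinv hfuel
    cases hq : q[k]? with
    | none =>
      have hk : q.length ≤ k := by
        by_contra h
        rw [List.getElem?_eq_getElem (by omega)] at hq
        simp at hq
      simp only [pvLoopB, hq]
      exact pvPostB_of_done hcl hsV hinv hk
    | some l =>
      obtain ⟨x, y⟩ := l
      obtain ⟨hk, hqk⟩ := List.getElem?_eq_some_iff.mp hq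
      obtain ⟨hnd, hR, hsq, hsnd, hsiff, hsb, hexp⟩ := hinv
      have hxyq : (x, y) ∈ q := by rw [← hqk]; exact List.getElem_mem hk
      have hxyR : pvReach g s (x, y) := hR _ hxyq
      have hxyP : pvPos g (x, y) := pvPos_of_reach hs hxyR
      simp only [pvLoopB, hq]
      rw [pvExpandB_eq]
      obtain ⟨new, heq, hnd1, hmem1, hlast1⟩ :=
        pvFoldB_spec g [(x - 1, y), (x + 1, y), (x, y - 1), (x, y + 1)] q seen
      rw [heq]
      have hqseen : ∀ p ∈ q, p ∈ seen := fun p hp => (hsiff p).mpr (Or.inr hp)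
      have hnewR : ∀ p ∈ new, pvReach g s p := by
        intro p hp
        exact Relation.ReflTransGen.tail hxyR
          ((pvAdj_iff_mem hxyP).mpr ⟨(hmem1 p hp).1, (hmem1 p hp).2.1⟩)
      have hnewb : ∀ p ∈ new, pvInB g p := fun p hp => (hmem1 p hp).2.1.1
      have hsnd1 : (seen ++ new : List (Int × Int)).Nodup := by
        rw [List.nodup_append]
        exact ⟨hsnd, hnd1, fun a ha b hb hab => (hmem1 b hb).2.2 (hab ▸ ha)⟩
      have hsb1 : ∀ p ∈ seen ++ new, pvInB g p := by
        intro p hp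
        rcases List.mem_append.mp hp with h | h
        · exact hsb p h
        · exact hnewb p h
      refine ih (q ++ new) (k + 1) (seen ++ new) ⟨?_, ?_, ?_, hsnd1, ?_, hsb1, ?_⟩ ?_
      · rw [List.nodup_append]
        exact ⟨hnd, hnd1, fun a ha b hb hab => (hmem1 b hb).2.2 (hab ▸ hqseen a ha)⟩
      · intro p hp
        rcases List.mem_append.mp hp with h | h
        · exact hR p h
        · exact hnewR p h
      · exact List.mem_append_left _ hsq
      · intro p
        simp only [List.mem_append]
        rw [hsiff p]
        tauto
      · -- expandedness of the first k+1 entries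
        intro p hp t ht
        rw [List.take_append_of_le_length (by omega)] at hp
        rw [List.take_add_one, List.getElem?_eq_getElem hk] at hp
        simp only [Option.toList_some, List.mem_append, List.mem_singleton] at hp
        rcases hp with hp | hp
        · exact List.mem_append_left _ (hexp p hp t ht)
        · subst hp
          rw [hqk] at ht
          have := (pvAdj_iff_mem hxyP).mp ht
          exact hlast1 t this.1 this.2
      · -- fuel accounting
        have hle := pvSeen_le hsnd1 hsb1
        simp only [List.length_append] at hle ⊢
        omega
-- ============ outer scan, re-expressed as one fold over the cell list ============
def pvPairs (g : List (List Int)) : List (Int × Int) :=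
  (PySem.List.pyRange 0 (g.length : Int) 1).flatMap
    (fun i => (PySem.List.pyRange 0 ((g.headD []).length : Int) 1).map (fun j => (i, j)))

def pvCellStepA (g : List (List Int)) (acc : List (List Int) × List (List Bool)) (p : Int × Int) :
    List (List Int) × List (List Bool) :=
  if 0 < pvGet2 g p.1 p.2 ∧ pvVGet acc.2 p.1 p.2 = false then
    let r := pvLoopA g g.length (g.headD []).length
      (g.length * (g.headD []).length + 2) (pvMark acc.2 p.1 p.2)
      [(p.1, p.2), (p.1, p.2)] [] p.2 p.2 p.1
    (pvPaintRowsA g.length r.2.2.1 r.2.2.2.1 r.2.1.length (r.2.2.2.2 + 1) acc.1, r.1)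
  else acc

def pvCellStepB (g : List (List Int))
    (acc : PySem.Set (Int × Int) × List (Int × Int × Int × Int)) (p : Int × Int) :
    PySem.Set (Int × Int) × List (Int × Int × Int × Int) :=
  if 0 < pvGet2 g p.1 p.2 ∧ (p.1, p.2) ∉ acc.1 then
    let r := pvLoopB g g.length (g.headD []).length
      (g.length * (g.headD []).length + 1) [(p.1, p.2)] 0
      (PySem.Set.add acc.1 (p.1, p.2))
    (r.2, acc.2 ++ [(pvListMin (r.1.map (·.2)), pvListMax (r.1.map (·.2)),
                     pvListMax (r.1.map (·.1)),
                     ((PySem.Set.ofList (r.1.map (fun c => pvGet2 g c.1 c.2))).length : Int))])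
  else acc

def pvRender (g : List (List Int)) (rects : List (Int × Int × Int × Int)) : List (List Int) :=
  (PySem.List.enumerate g 0).map (fun rrow =>
    (PySem.List.enumerate rrow.2 0).map (fun cv =>
      if cv.2 = 0 ∧ pvCoveredB rects rrow.1 cv.1 = true then 3 else cv.2))

lemma transform_eq_scan (g : List (List Int)) (hne : g ≠ []) :
    transform g =
      ((pvPairs g).foldl (pvCellStepA g)
        (g, List.replicate g.length (List.replicate (g.headD []).length false))).1 := by
  unfold transform
  rw [if_neg hne]
  show ((PySem.List.pyRange 0 (g.length : Int) 1).foldl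
      (fun acc i => (PySem.List.pyRange 0 ((g.headD []).length : Int) 1).foldl
        (fun acc j => pvCellStepA g acc (i, j)) acc)
      (g, List.replicate g.length (List.replicate (g.headD []).length false))).1 = _
  rw [pvPairs, List.foldl_flatMap]
  exact congrArg Prod.fst (PySem.List.foldl_congr_mem _ _ _ _ (fun acc i _ => by rw [List.foldl_map]))

lemma transform_alt_eq_scan (g : List (List Int)) (hne : g ≠ []) :
    transform_alt g = pvRender g ((pvPairs g).foldl (pvCellStepB g) ([], [])).2 := by
  unfold transform_alt
  rw [if_neg hne]
  show pvRender g (((PySem.List.pyRange 0 (g.length : Int) 1).foldl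
      (fun acc i => (PySem.List.pyRange 0 ((g.headD []).length : Int) 1).foldl
        (fun acc j => pvCellStepB g acc (i, j)) acc) ([], [])).2) = _
  rw [pvPairs, List.foldl_flatMap]
  exact congrArg (pvRender g)
    (congrArg Prod.snd (PySem.List.foldl_congr_mem _ _ _ _ (fun acc i _ => by rw [List.foldl_map])))
-- ============ bridging the two components' aggregates ============
lemma pvListMin_isMin {g : List (List Int)} {s : Int × Int} {f : Int × Int → Int}
    {q : List (Int × Int)} (hq : ∀ p, p ∈ q ↔ pvReach g s p) (hs : s ∈ q) :
    pvIsMin g s f (pvListMin (q.map f)) := by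
  cases q with
  | nil => simp at hs
  | cons a r =>
    have hform : pvListMin ((a :: r).map f) = (r.map f).foldl min (f a) := rfl
    rw [hform]
    obtain ⟨hle, hlb⟩ := PySem.List.foldl_min_le (r.map f) (f a)
    constructor
    · rcases PySem.List.foldl_min_mem (r.map f) (f a) with h | h
      · exact ⟨a, (hq a).mp List.mem_cons_self, h.symm⟩
      · obtain ⟨p, hp, hfp⟩ := List.mem_map.mp h
        exact ⟨p, (hq p).mp (List.mem_cons_of_mem _ hp), hfp⟩
    · intro p hreach
      rcases List.mem_cons.mp ((hq p).mpr hreach) with rfl | hpr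
      · exact hle
      · exact hlb (f p) (List.mem_map_of_mem hpr)

lemma pvListMax_isMax {g : List (List Int)} {s : Int × Int} {f : Int × Int → Int}
    {q : List (Int × Int)} (hq : ∀ p, p ∈ q ↔ pvReach g s p) (hs : s ∈ q) :
    pvIsMax g s f (pvListMax (q.map f)) := by
  cases q with
  | nil => simp at hs
  | cons a r =>
    have hform : pvListMax ((a :: r).map f) = (r.map f).foldl max (f a) := rfl
    rw [hform]
    obtain ⟨hle, hub⟩ := PySem.List.le_foldl_max (r.map f) (f a)
    constructor
    · rcases PySem.List.foldl_max_mem (r.map f) (f a) with h | h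
      · exact ⟨a, (hq a).mp List.mem_cons_self, h.symm⟩
      · obtain ⟨p, hp, hfp⟩ := List.mem_map.mp h
        exact ⟨p, (hq p).mp (List.mem_cons_of_mem _ hp), hfp⟩
    · intro p hreach
      rcases List.mem_cons.mp ((hq p).mpr hreach) with rfl | hpr
      · exact hle
      · exact hub (f p) (List.mem_map_of_mem hpr)

lemma pvColors_len_eq {g : List (List Int)} {s : Int × Int} {cs : PySem.Set Int}
    {q : List (Int × Int)} (hnd : cs.Nodup)
    (hcs : ∀ z, z ∈ cs ↔ ∃ p, pvReach g s p ∧ pvGet2 g p.1 p.2 = z)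
    (hq : ∀ p, p ∈ q ↔ pvReach g s p) :
    cs.length = (PySem.Set.ofList (q.map (fun c => pvGet2 g c.1 c.2))).length := by
  apply List.Perm.length_eq
  rw [List.perm_ext_iff_of_nodup hnd (PySem.Set.nodup_ofList _)]
  intro z
  rw [hcs z, PySem.Set.mem_ofList]
  simp only [List.mem_map]
  constructor
  · rintro ⟨p, hr, hz⟩
    exact ⟨p, (hq p).mpr hr, hz⟩
  · rintro ⟨p, hp, hz⟩
    exact ⟨p, (hq p).mp hp, hz⟩

-- ============ the joint scan invariant ============
def pvApplyRects (g : List (List Int)) (rects : List (Int × Int × Int × Int))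
    (out : List (List Int)) : List (List Int) :=
  rects.foldl (fun o r => pvPaintRowsA (g.length : Int) r.1 r.2.1 r.2.2.2.toNat (r.2.2.1 + 1) o) out

lemma pvApplyRects_snoc (g : List (List Int)) (rects : List (Int × Int × Int × Int))
    (r : Int × Int × Int × Int) (out : List (List Int)) :
    pvApplyRects g (rects ++ [r]) out =
      pvPaintRowsA (g.length : Int) r.1 r.2.1 r.2.2.2.toNat (r.2.2.1 + 1)
        (pvApplyRects g rects out) := by
  rw [pvApplyRects, pvApplyRects, List.foldl_append]
  rfl

def pvRectsGood (g : List (List Int)) (rects : List (Int × Int × Int × Int)) : Prop :=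
  ∀ r ∈ rects, 0 ≤ r.1 ∧ r.1 ≤ r.2.1 ∧ r.2.1 < ((g.headD []).length : Int) ∧
    0 ≤ r.2.2.1 ∧ r.2.2.1 < (g.length : Int)

def pvRel (g : List (List Int)) (a : List (List Int) × List (List Bool))
    (b : PySem.Set (Int × Int) × List (Int × Int × Int × Int)) : Prop :=
  pvWfV g a.2 ∧ (∀ p, p ∈ pvVS a.2 ↔ p ∈ b.1) ∧ b.1.Nodup ∧ (∀ p ∈ b.1, pvInB g p) ∧
  (∀ p ∈ pvVS a.2, ∀ t, pvAdj g p t → t ∈ pvVS a.2) ∧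
  a.1 = pvApplyRects g b.2 g ∧ pvRectsGood g b.2

lemma pvCellStep_rel {g : List (List Int)} {a : List (List Int) × List (List Bool)}
    {b : PySem.Set (Int × Int) × List (Int × Int × Int × Int)}
    (hrel : pvRel g a b) {p : Int × Int} (hp : pvInB g p) :
    pvRel g (pvCellStepA g a p) (pvCellStepB g b p) := by
  obtain ⟨hwf, hiff, hnd, hinb, hcl, hout, hgood⟩ := hrel
  by_cases hg : 0 < pvGet2 g p.1 p.2
  · by_cases hseen : (p.1, p.2) ∈ b.1
    · -- already visited: both sides skip
      have hvst : p ∈ pvVS a.2 := (hiff p).mpr hseen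
      have hvget : pvVGet a.2 p.1 p.2 = true := hvst.2.2
      rw [pvCellStepA, if_neg (by simp [hvget]), pvCellStepB, if_neg (by simp [hseen])]
      exact ⟨hwf, hiff, hnd, hinb, hcl, hout, hgood⟩
    · -- a fresh component is discovered by both
      have hpos : pvPos g p := ⟨hp, hg⟩
      have hnvs : p ∉ pvVS a.2 := fun h => hseen ((hiff p).mp h)
      have hvget : pvVGet a.2 p.1 p.2 = false := (pvPos_notVS_iff hpos).mp hnvs
      rw [pvCellStepA, if_pos ⟨hg, hvget⟩, pvCellStepB, if_pos ⟨hg, hseen⟩]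
      dsimp only
      have hwf1 : pvWfV g (pvMark a.2 p.1 p.2) := pvWfV_mark hwf _ _
      have hvs1 : pvVS (pvMark a.2 p.1 p.2) = pvVS a.2 ∪ {p} := by
        have := pvVS_mark hwf (x := p.1) (y := p.2) hp
        simpa using this
      -- A component run
      have hPostA := pvLoopA_spec g p (pvVS a.2) hcl hnvs hpos
        (g.length * (g.headD []).length + 2) (pvMark a.2 p.1 p.2) [(p.1, p.2), (p.1, p.2)]
        [] p.2 p.2 p.1 {p} ∅
        ⟨hwf1, by rw [hvs1], by rintro q rfl; exact Relation.ReflTransGen.refl, rfl,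
         by rintro q hq; rcases List.mem_cons.mp hq with rfl | hq' <;> simp_all,
         by rintro q rfl; exact Or.inl (by simp),
         by rintro q hq; exact absurd hq (Set.notMem_empty q),
         by rintro q hq; exact absurd hq (Set.notMem_empty q),
         ⟨List.nodup_nil, fun z => by simp⟩,
         ⟨Or.inl rfl, le_refl _, by rintro q hq; exact absurd hq (Set.notMem_empty q)⟩,
         ⟨Or.inl rfl, le_refl _, by rintro q hq; exact absurd hq (Set.notMem_empty q)⟩,
         ⟨Or.inl rfl, le_refl _, by rintro q hq; exact absurd hq (Set.notMem_empty q)⟩⟩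
        (by
          have := pvMu_le (v := pvMark a.2 p.1 p.2) hwf1
          simp only [List.length_cons, List.length_nil]
          omega)
      -- B component run
      have hadd : PySem.Set.add b.1 (p.1, p.2) = b.1 ++ [(p.1, p.2)] :=
        PySem.Set.add_of_not_mem hseen
      have hInvB : pvInvB g p (pvVS a.2) [(p.1, p.2)] 0 (PySem.Set.add b.1 (p.1, p.2)) := by
        refine ⟨List.nodup_singleton _, ?_, ?_, ?_, ?_, ?_, ?_⟩
        · intro q hq
          rcases List.mem_singleton.mp hq with rfl
          exact Relation.ReflTransGen.refl
        · simp
        · rw [hadd, List.nodup_append]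
          refine ⟨hnd, List.nodup_singleton _, ?_⟩
          intro z hz w hw hzw
          rcases List.mem_singleton.mp hw with rfl
          exact hseen (hzw ▸ hz)
        · intro z
          rw [hadd]
          simp only [List.mem_append, List.mem_cons, List.not_mem_nil, or_false]
          constructor
          · rintro (h | rfl)
            · exact Or.inl ((hiff z).mpr h)
            · exact Or.inr rfl
          · rintro (h | rfl)
            · exact Or.inl ((hiff z).mp h)
            · exact Or.inr rfl
        · intro z hz
          rw [hadd, List.mem_append, List.mem_singleton] at hz
          rcases hz with h | rfl
          · exact hinb z h
          · exact hp
        · intro q hq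
          simp at hq
      have hPostB := pvLoopB_spec g p (pvVS a.2) hcl hnvs hpos
        (g.length * (g.headD []).length + 1) [(p.1, p.2)] 0 (PySem.Set.add b.1 (p.1, p.2))
        hInvB (by simp only [List.length_cons, List.length_nil]; omega)
      · -- now combine the two post-conditions
        unfold pvRel
        obtain ⟨hAwf, hAvs, hAnd, hAcs, hAmn, hAmx, hAmr⟩ := hPostA
        obtain ⟨hBnd, hBq, hBsnd, hBsiff, hBsb⟩ := hPostB
        have hsq : p ∈ (pvLoopB g ((g.length : Nat) : Int) (((g.headD []).length : Nat) : Int)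
            (g.length * (g.headD []).length + 1) [(p.1, p.2)] 0
            (PySem.Set.add b.1 (p.1, p.2))).1 := (hBq p).mpr Relation.ReflTransGen.refl
        have hmn := pvIsMin_unique hAmn (pvListMin_isMin (f := (·.2)) hBq hsq)
        have hmx := pvIsMax_unique hAmx (pvListMax_isMax (f := (·.2)) hBq hsq)
        have hmr := pvIsMax_unique hAmr (pvListMax_isMax (f := (·.1)) hBq hsq)
        have hn := pvColors_len_eq hAnd hAcs hBq
        refine ⟨hAwf, ?_, hBsnd, hBsb, ?_, ?_, ?_⟩
        · intro z
          rw [hAvs, hBsiff z]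
          simp only [Set.mem_union, Set.mem_setOf_eq]
        · -- closedness of the enlarged visited set
          intro z hz t ht
          rw [hAvs] at hz ⊢
          rcases hz with hz | hz
          · exact Or.inl (hcl z hz t ht)
          · exact Or.inr (Relation.ReflTransGen.tail hz ht)
        · -- the outputs stay in sync
          dsimp only
          rw [hout, pvApplyRects_snoc, hmn, hmx, hmr, hn, Int.toNat_natCast]
        · -- rectangle sanity
          intro r hr
          rcases List.mem_append.mp hr with h | h
          · exact hgood r h
          · rcases List.mem_singleton.mp h with rfl
            dsimp only
            obtain ⟨⟨pm, hpmr, hpm⟩, hmnlb⟩ := hAmn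
            obtain ⟨⟨px, hpxr, hpx⟩, hmxub⟩ := hAmx
            obtain ⟨⟨pr, hprr, hpr⟩, hmrub⟩ := hAmr
            have h1 := (pvPos_of_reach hpos hpmr).1
            have h2 := (pvPos_of_reach hpos hpxr).1
            have h3 := (pvPos_of_reach hpos hprr).1
            have h4 := hmnlb p Relation.ReflTransGen.refl
            have h5 := hmxub p Relation.ReflTransGen.refl
            dsimp only at hpm hpx hpr h4 h5
            rw [← hmn, ← hmx, ← hmr]
            obtain ⟨b1, b2, b3, b4⟩ := h1
            obtain ⟨c1, c2, c3, c4⟩ := h2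
            obtain ⟨d1, d2, d3, d4⟩ := h3
            refine ⟨by omega, by omega, by omega, by omega, by omega⟩
  · -- non-positive cell: both sides skip
    rw [pvCellStepA, if_neg (by intro h; exact hg h.1), pvCellStepB,
      if_neg (by intro h; exact hg h.1)]
    exact ⟨hwf, hiff, hnd, hinb, hcl, hout, hgood⟩

lemma pvScan_rel (g : List (List Int)) :
    ∀ (pairs : List (Int × Int)) (a : List (List Int) × List (List Bool))
      (b : PySem.Set (Int × Int) × List (Int × Int × Int × Int)),
      (∀ p ∈ pairs, pvInB g p) → pvRel g a b →
      pvRel g (pairs.foldl (pvCellStepA g) a) (pairs.foldl (pvCellStepB g) b) := by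
  intro pairs
  induction pairs with
  | nil => intro a b _ hrel; exact hrel
  | cons p ps ih =>
    intro a b hmem hrel
    simp only [List.foldl_cons]
    exact ih _ _ (fun q hq => hmem q (List.mem_cons_of_mem _ hq))
      (pvCellStep_rel hrel (hmem p List.mem_cons_self))

lemma pvPairs_inB (g : List (List Int)) : ∀ p ∈ pvPairs g, pvInB g p := by
  intro p hp
  simp only [pvPairs, List.mem_flatMap, List.mem_map] at hp
  obtain ⟨i, hi, j, hj, rfl⟩ := hp
  rw [PySem.List.mem_pyRange_one] at hi hj
  exact ⟨hi.1, hi.2, hj.1, hj.2⟩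

lemma pvVGet_init (g : List (List Int)) (x y : Int) :
    pvVGet (List.replicate g.length (List.replicate (g.headD []).length false)) x y = false := by
  by_cases hx : x.toNat < g.length
  · have h1 : (List.replicate g.length (List.replicate (g.headD []).length false)).getD x.toNat []
        = List.replicate (g.headD []).length false := by
      rw [List.getD_eq_getElem?_getD, List.getElem?_replicate, if_pos hx]
      rfl
    rw [pvVGet, h1, List.getD_eq_getElem?_getD, List.getElem?_replicate]
    split <;> rfl
  · rw [pvVGet, pvGetD_oob (List.replicate g.length (List.replicate (g.headD []).length false))
      x.toNat [] (by simp; omega)]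
    rw [pvGetD_oob [] y.toNat false (by simp)]

lemma pvRel_init (g : List (List Int)) :
    pvRel g (g, List.replicate g.length (List.replicate (g.headD []).length false)) ([], []) := by
  have hvs : pvVS (List.replicate g.length (List.replicate (g.headD []).length false)) = ∅ := by
    ext z
    simp only [pvVS, Set.mem_setOf_eq, Set.mem_empty_iff_false, iff_false, not_and]
    intro _ _
    rw [pvVGet_init]
    simp
  refine ⟨⟨by simp, ?_⟩, ?_, List.nodup_nil, by simp, ?_, rfl, by intro r hr; simp at hr⟩
  · intro r hr
    rw [List.eq_of_mem_replicate hr]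
    simp
  · intro z
    rw [hvs]
    simp
  · intro z hz
    rw [hvs] at hz
    exact absurd hz (Set.notMem_empty z)
-- ============ painting, pointwise ============
def pvGetO (out : List (List Int)) (a b : Int) : Int := (out.getD a.toNat []).getD b.toNat 0

lemma pvGetO_natCast {out : List (List Int)} {k l : Nat} (hk : k < out.length)
    (hl : l < out[k].length) : pvGetO out (k : Int) (l : Int) = out[k][l] := by
  simp [pvGetO, List.getD_eq_getElem?_getD, List.getElem?_eq_getElem hk,
    List.getElem?_eq_getElem hl]

lemma pvShape_spec {o1 o2 : List (List Int)} (h : o1.map List.length = o2.map List.length) :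
    o1.length = o2.length ∧ ∀ (k : Nat) (hk1 : k < o1.length) (hk2 : k < o2.length),
      o1[k].length = o2[k].length := by
  have hlen : o1.length = o2.length := by
    have := congrArg List.length h
    simpa using this
  refine ⟨hlen, ?_⟩
  intro k hk1 hk2
  have h1 := List.getElem_of_eq h (by simpa using hk1)
  simpa using h1

lemma pvPaintCell_eq (out : List (List Int)) (nr c : Int) :
    pvPaintCell out nr c = if pvGetO out nr c = 0
      then out.set nr.toNat ((out.getD nr.toNat []).set c.toNat 3) else out := rfl

lemma pvPaintCell_shape (out : List (List Int)) (nr c : Int) :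
    (pvPaintCell out nr c).map List.length = out.map List.length := by
  rw [pvPaintCell_eq]
  split
  · by_cases h : nr.toNat < out.length
    · have hrow : out.getD nr.toNat [] = out[nr.toNat] := by
        rw [List.getD_eq_getElem?_getD, List.getElem?_eq_getElem h, Option.getD_some]
      rw [List.map_set, hrow, List.length_set]
      have h2 : out[nr.toNat].length = (out.map List.length)[nr.toNat]'(by simpa using h) := by
        simp
      rw [h2, List.set_getElem_self]
    · rw [List.set_eq_of_length_le (by omega)]
  · rfl

lemma pvGetO_set_self {out : List (List Int)} {nr c : Int}
    (hnr : nr.toNat < out.length) (hc : c.toNat < out[nr.toNat].length) :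
    pvGetO (out.set nr.toNat ((out.getD nr.toNat []).set c.toNat 3)) nr c = 3 := by
  have hrow : out.getD nr.toNat [] = out[nr.toNat] := by
    rw [List.getD_eq_getElem?_getD, List.getElem?_eq_getElem hnr, Option.getD_some]
  rw [hrow]
  simp only [pvGetO, List.getD_eq_getElem?_getD, List.getElem?_set_self hnr, Option.getD_some]
  rw [List.getElem?_set_self hc]
  rfl

lemma pvGetO_set_other {out : List (List Int)} {nr c a b : Int}
    (hne : ¬ (a.toNat = nr.toNat ∧ b.toNat = c.toNat)) :
    pvGetO (out.set nr.toNat ((out.getD nr.toNat []).set c.toNat 3)) a b = pvGetO out a b := by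
  by_cases hx : nr.toNat < out.length
  · by_cases hax : a.toNat = nr.toNat
    · have hby : b.toNat ≠ c.toNat := fun h => hne ⟨hax, h⟩
      have hrow : out.getD nr.toNat [] = out[nr.toNat] := by
        rw [List.getD_eq_getElem?_getD, List.getElem?_eq_getElem hx, Option.getD_some]
      rw [pvGetO, pvGetO, hax, hrow]
      simp [List.getD_eq_getElem?_getD, List.getElem?_set_self hx,
        List.getElem?_set_ne (Ne.symm hby)]
    · simp [pvGetO, List.getD_eq_getElem?_getD, List.getElem?_set_ne (Ne.symm hax)]
  · rw [List.set_eq_of_length_le (by omega)]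

lemma pvGetO_paintCell {out : List (List Int)} {nr c a b : Int}
    (h0 : 0 ≤ nr) (h0c : 0 ≤ c) (ha : 0 ≤ a) (hb : 0 ≤ b)
    (hnr : nr.toNat < out.length) (hc : c.toNat < out[nr.toNat].length) :
    pvGetO (pvPaintCell out nr c) a b =
      if a = nr ∧ b = c ∧ pvGetO out nr c = 0 then 3 else pvGetO out a b := by
  rw [pvPaintCell_eq]
  by_cases hz : pvGetO out nr c = 0
  · rw [if_pos hz]
    by_cases hab : a = nr ∧ b = c
    · rw [if_pos ⟨hab.1, hab.2, hz⟩, hab.1, hab.2]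
      exact pvGetO_set_self hnr hc
    · rw [if_neg (fun h => hab ⟨h.1, h.2.1⟩)]
      apply pvGetO_set_other
      intro ⟨h1, h2⟩
      exact hab ⟨by omega, by omega⟩
  · rw [if_neg hz, if_neg (fun h => hz h.2.2)]

lemma pvPaintFold_shape (nr : Int) :
    ∀ (cols : List Int) (out : List (List Int)),
      ((cols.foldl (fun o c => pvPaintCell o nr c) out).map List.length) = out.map List.length := by
  intro cols
  induction cols with
  | nil => intro out; rfl
  | cons c cs ih =>
    intro out
    rw [List.foldl_cons, ih, pvPaintCell_shape]

lemma pvPaintRow_get {mx nr : Int} (h0 : 0 ≤ nr) :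
    ∀ (n : Nat) (lo : Int) (out : List (List Int)), (mx + 1 - lo).toNat = n → 0 ≤ lo →
      ∀ (hnr : nr.toNat < out.length), mx.toNat < (out[nr.toNat]'hnr).length →
      ∀ a b : Int, 0 ≤ a → 0 ≤ b →
      pvGetO ((PySem.List.pyRange lo (mx + 1) 1).foldl (fun o c => pvPaintCell o nr c) out) a b =
        if a = nr ∧ lo ≤ b ∧ b ≤ mx ∧ pvGetO out a b = 0 then 3 else pvGetO out a b := by
  intro n
  induction n with
  | zero =>
    intro lo out hn hlo hnr hmx a b ha hb
    rw [PySem.List.pyRange_one_eq_nil (by omega), List.foldl_nil,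
      if_neg (by rintro ⟨-, h2, h3, -⟩; omega)]
  | succ n ih =>
    intro lo out hn hlo hnr hmx a b ha hb
    rw [PySem.List.pyRange_one_cons (by omega), List.foldl_cons]
    have hshape := pvPaintCell_shape out nr lo
    obtain ⟨hlen, hrows⟩ := pvShape_spec hshape
    have hclo : lo.toNat < out[nr.toNat].length := by omega
    rw [ih (lo + 1) (pvPaintCell out nr lo) (by omega) (by omega) (by omega)
      (by rw [hrows nr.toNat (by omega) (by omega)]; omega) a b ha hb]
    rw [pvGetO_paintCell h0 hlo ha hb hnr hclo]
    by_cases hab : a = nr ∧ b = lo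
    · obtain ⟨h1, h2⟩ := hab
      subst h1
      subst h2
      split_ifs <;> omega
    · split_ifs <;> omega

lemma pvPaintRowsA_get {g : List (List Int)} {mn mx : Int} (h0n : 0 ≤ mn)
    (hrow : ∀ (k : Nat) (hk : k < g.length), mx.toNat < (g[k]'hk).length) :
    ∀ (n : Nat) (nr : Int) (out : List (List Int)),
      out.map List.length = g.map List.length → 0 ≤ nr →
      ∀ a b : Int, 0 ≤ a → 0 ≤ b →
      pvGetO (pvPaintRowsA (g.length : Int) mn mx n nr out) a b =
        if pvGetO out a b = 0 ∧ mn ≤ b ∧ b ≤ mx ∧ nr ≤ a ∧ a < nr + (n : Int) ∧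
            a < (g.length : Int)
        then 3 else pvGetO out a b := by
  intro n
  induction n with
  | zero =>
    intro nr out hshape hnr a b ha hb
    rw [pvPaintRowsA, if_neg (by rintro ⟨-, -, -, h4, h5, -⟩; omega)]
  | succ n ih =>
    intro nr out hshape hnr a b ha hb
    rw [pvPaintRowsA]
    by_cases hend : (g.length : Int) ≤ nr
    · rw [if_pos hend, if_neg (by rintro ⟨-, -, -, h4, -, h6⟩; omega)]
    · rw [if_neg hend]
      obtain ⟨hlen, hrows⟩ := pvShape_spec hshape
      have hnrl : nr.toNat < out.length := by omega
      have hmxl : mx.toNat < out[nr.toNat].length := by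
        rw [hrows nr.toNat hnrl (by omega)]
        exact hrow nr.toNat (by omega)
      have hshape1 : (pvPaintRowA out mn mx nr).map List.length = g.map List.length := by
        rw [pvPaintRowA, pvPaintFold_shape, hshape]
      rw [ih (nr + 1) (pvPaintRowA out mn mx nr) hshape1 (by omega) a b ha hb]
      rw [pvPaintRowA, pvPaintRow_get (by omega) (mx + 1 - mn).toNat mn out rfl h0n hnrl hmxl
        a b ha hb]
      by_cases hanr : a = nr
      · subst hanr
        split_ifs <;> omega
      · split_ifs <;> omega
-- ============ sequential painting = pointwise formula ============
lemma pvPaintRowsA_shape (hh mn mx : Int) :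
    ∀ (n : Nat) (nr : Int) (out : List (List Int)),
      (pvPaintRowsA hh mn mx n nr out).map List.length = out.map List.length := by
  intro n
  induction n with
  | zero => intro nr out; rfl
  | succ n ih =>
    intro nr out
    rw [pvPaintRowsA]
    split
    · rfl
    · rw [ih, pvPaintRowA, pvPaintFold_shape]

lemma pvApplyRects_cons (g : List (List Int)) (r : Int × Int × Int × Int)
    (rs : List (Int × Int × Int × Int)) (out : List (List Int)) :
    pvApplyRects g (r :: rs) out =
      pvApplyRects g rs (pvPaintRowsA (g.length : Int) r.1 r.2.1 r.2.2.2.toNat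
        (r.2.2.1 + 1) out) := rfl

lemma pvApplyRects_shape (g : List (List Int)) :
    ∀ (rects : List (Int × Int × Int × Int)) (out : List (List Int)),
      (pvApplyRects g rects out).map List.length = out.map List.length := by
  intro rects
  induction rects with
  | nil => intro out; rfl
  | cons r rs ih =>
    intro out
    rw [pvApplyRects_cons, ih, pvPaintRowsA_shape]

lemma pvApplyRects_get {g : List (List Int)}
    (hpre : ∀ row ∈ g, (g.headD []).length ≤ row.length) :
    ∀ (rects : List (Int × Int × Int × Int)) (out : List (List Int)),
      pvRectsGood g rects → out.map List.length = g.map List.length →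
      ∀ a b : Int, 0 ≤ a → a < (g.length : Int) → 0 ≤ b →
      pvGetO (pvApplyRects g rects out) a b =
        if pvGetO out a b = 0 ∧ pvCoveredB rects a b = true then 3 else pvGetO out a b := by
  intro rects
  induction rects with
  | nil =>
    intro out hgood hshape a b ha ha2 hb
    rw [if_neg (by simp [pvCoveredB])]
    rfl
  | cons r rs ih =>
    intro out hgood hshape a b ha ha2 hb
    obtain ⟨g1, g2, g3, g4, g5⟩ := hgood r List.mem_cons_self
    have hgood' : pvRectsGood g rs := fun q hq => hgood q (List.mem_cons_of_mem _ hq)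
    have hrowb : ∀ (k : Nat) (hk : k < g.length), r.2.1.toNat < (g[k]'hk).length := by
      intro k hk
      have := hpre (g[k]'hk) (List.getElem_mem hk)
      omega
    have hshape1 : (pvPaintRowsA (g.length : Int) r.1 r.2.1 r.2.2.2.toNat (r.2.2.1 + 1)
        out).map List.length = g.map List.length := by
      rw [pvPaintRowsA_shape, hshape]
    rw [pvApplyRects_cons, ih _ hgood' hshape1 a b ha ha2 hb,
      pvPaintRowsA_get g1 hrowb r.2.2.2.toNat (r.2.2.1 + 1) out hshape (by omega) a b ha hb]
    have hcons : (pvCoveredB (r :: rs) a b = true) ↔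
        (r.1 ≤ b ∧ b ≤ r.2.1 ∧ r.2.2.1 < a ∧ a ≤ r.2.2.1 + r.2.2.2) ∨
          pvCoveredB rs a b = true := by
      simp [pvCoveredB]
    have hC1 : (pvGetO out a b = 0 ∧ r.1 ≤ b ∧ b ≤ r.2.1 ∧ r.2.2.1 + 1 ≤ a ∧
        a < r.2.2.1 + 1 + (r.2.2.2.toNat : Int) ∧ a < (g.length : Int)) ↔
        (pvGetO out a b = 0 ∧ (r.1 ≤ b ∧ b ≤ r.2.1 ∧ r.2.2.1 < a ∧ a ≤ r.2.2.1 + r.2.2.2)) := by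
      omega
    rw [if_congr hC1 rfl rfl]
    by_cases hG : pvGetO out a b = 0 <;>
      by_cases hin : r.1 ≤ b ∧ b ≤ r.2.1 ∧ r.2.2.1 < a ∧ a ≤ r.2.2.1 + r.2.2.2 <;>
      by_cases hcv : pvCoveredB rs a b = true <;>
      simp [hcons, hG, hin, hcv]

-- the functional comprehension computes the same grid
lemma pvApply_eq_render (g : List (List Int))
    (hpre : ∀ row ∈ g, (g.headD []).length ≤ row.length)
    (rects : List (Int × Int × Int × Int)) (hgood : pvRectsGood g rects) :
    pvApplyRects g rects g = pvRender g rects := by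
  obtain ⟨hlen, hrows⟩ := pvShape_spec (pvApplyRects_shape g rects g)
  apply List.ext_getElem
  · rw [hlen]
    simp [pvRender, PySem.List.length_enumerate]
  · intro k h1 h2
    have hk : k < g.length := by omega
    have hrenk : (pvRender g rects)[k] =
        (PySem.List.enumerate (g[k]'hk) 0).map (fun cv =>
          if cv.2 = 0 ∧ pvCoveredB rects (k : Int) cv.1 = true then 3 else cv.2) := by
      simp only [pvRender, List.getElem_map, PySem.List.getElem_enumerate]
      simp
    rw [hrenk]
    apply List.ext_getElem
    · rw [hrows k h1 hk]
      simp [PySem.List.length_enumerate]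
    · intro l hl1 hl2
      have hll : l < (g[k]'hk).length := by
        have := hrows k h1 hk
        omega
      have hrhs : ((PySem.List.enumerate (g[k]'hk) 0).map (fun cv =>
          if cv.2 = 0 ∧ pvCoveredB rects (k : Int) cv.1 = true then 3 else cv.2))[l]'hl2 =
          (if (g[k]'hk)[l]'hll = 0 ∧ pvCoveredB rects (k : Int) (l : Int) = true then 3
           else (g[k]'hk)[l]'hll) := by
        rw [List.getElem_map, PySem.List.getElem_enumerate]
        simp
      rw [hrhs]
      have hlhs : (pvApplyRects g rects g)[k][l] = pvGetO (pvApplyRects g rects g) (k : Int) (l : Int) :=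
        (pvGetO_natCast h1 hl1).symm
      rw [hlhs, pvApplyRects_get hpre rects g hgood rfl (k : Int) (l : Int)
        (Int.natCast_nonneg k) (by exact_mod_cast hk) (Int.natCast_nonneg l)]
      rw [pvGetO_natCast hk hll]

-- ===== VERDICT (by name: the statement is the Claim_ definition above) =====
theorem transform_spec : Claim_equal_transform := by
  unfold Claim_equal_transform Spec_transform
  intro g _hdom hpre
  by_cases hne : g = []
  · subst hne; rfl
  · rw [transform_eq_scan g hne, transform_alt_eq_scan g hne]
    obtain ⟨-, -, -, -, -, hout, hgood⟩ :=
      pvScan_rel g (pvPairs g) _ _ (pvPairs_inB g) (pvRel_init g)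
    rw [hout]
    exact pvApply_eq_render g hpre _ hgood
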